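-- pv_equiv track=rewrite | github.com/nicotine-plus/nicotine-plus | pynicotine/gtkgui/search.py | check_file_type
-- ===== SOURCE A (Python) =====
-- def check_file_type(result_filter, value):
--
--     allowed = False
--     found_inclusive = False
--
--     for ext in result_filter:
--         exclude_ext = None
--
--         if ext.startswith("!"):
--             exclude_ext = ext[1:]
--
--             if not exclude_ext.startswith("."):
--                 exclude_ext = "." + exclude_ext
--
--         elif not ext.startswith("."):
--             ext = "." + ext
--
--         if ext.startswith("!") and value.endswith(exclude_ext):
--             return False
--
--         if not ext.startswith("!"):
--             found_inclusive = True
--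
--             if value.endswith(ext):
--                 allowed = True
--
--     if not found_inclusive:
--         allowed = True
--
--     return allowed
-- ===== SOURCE B (Python) =====
-- def check_file_type(result_filter, value):
--     includes = []
--     excludes = []
--     for ext in result_filter:
--         if ext.startswith("!"):
--             ext = ext[1:]
--             excludes.append(ext if ext.startswith(".") else "." + ext)
--         else:
--             includes.append(ext if ext.startswith(".") else "." + ext)
--
--     if any(value.endswith(exclude) for exclude in excludes):
--         return False
--
--     return not includes or any(value.endswith(include) for include in includes)
-- ===== Notes on version B (the rewrite author's own statement) =====
-- stated objective: simpler
-- what changed: Replaces the interleaved loop with two boolean flags and a mid-loop early return by a partition pass building normalized include/exclude lists followed by two any() checks, relying on the fact that A's result is order-independent.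
import Mathlib
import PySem

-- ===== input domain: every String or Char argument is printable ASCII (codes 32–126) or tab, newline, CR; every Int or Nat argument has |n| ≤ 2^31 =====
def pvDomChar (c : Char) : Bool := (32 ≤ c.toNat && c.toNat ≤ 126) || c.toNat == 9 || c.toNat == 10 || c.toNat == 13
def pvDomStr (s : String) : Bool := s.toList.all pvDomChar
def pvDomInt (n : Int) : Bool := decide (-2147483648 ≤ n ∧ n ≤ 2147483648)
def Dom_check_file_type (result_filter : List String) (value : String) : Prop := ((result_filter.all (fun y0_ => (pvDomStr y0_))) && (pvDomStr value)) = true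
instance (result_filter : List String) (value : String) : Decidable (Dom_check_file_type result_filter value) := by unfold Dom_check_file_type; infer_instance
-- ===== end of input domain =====

-- B replaces A's interleaved loop (two flags + mid-loop early return) by a partition pass
-- into normalized include/exclude lists followed by two any-checks: simpler decomposition, same cost.


-- shared normalization helpers (exact ports of the identical Python lines both versions contain)
-- pvDot s = "." + s  (string concatenation)
def pvDot (s : String) : String := String.ofList ('.' :: s.toList)
-- exclude_ext = ext[1:]; if not exclude_ext.startswith("."): exclude_ext = "." + exclude_ext
def pvNormExcl (ext : String) : String :=
  let e := PySem.Str.slice ext (some 1) none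
  if !(PySem.Str.startswith e ".") then pvDot e else e
-- if not ext.startswith("."): ext = "." + ext
def pvNormIncl (ext : String) : String :=
  if !(PySem.Str.startswith ext ".") then pvDot ext else ext

-- ===== PORT A =====
-- A's single loop carrying the flags `allowed` and `found_inclusive`, with the early `return False`
def check_file_type_loop (value : String) : List String → Bool → Bool → Bool
  | [], allowed, found_inclusive => if !found_inclusive then true else allowed
  | ext :: rest, allowed, found_inclusive =>
    if PySem.Str.startswith ext "!" then
      if PySem.Str.endswith value (pvNormExcl ext) then false
      else check_file_type_loop value rest allowed found_inclusive
    else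
      check_file_type_loop value rest
        (if PySem.Str.endswith value (pvNormIncl ext) then true else allowed) true

def check_file_type (result_filter : List String) (value : String) : Bool :=
  check_file_type_loop value result_filter false false

-- ===== PORT B =====
def check_file_type_alt (result_filter : List String) (value : String) : Bool :=
  let p := result_filter.foldl
    (fun (acc : List String × List String) ext =>
      if PySem.Str.startswith ext "!" then (acc.1, acc.2 ++ [pvNormExcl ext])
      else (acc.1 ++ [pvNormIncl ext], acc.2))
    ([], [])
  if p.2.any (fun e => PySem.Str.endswith value e) then false
  else p.1.isEmpty || p.1.any (fun i => PySem.Str.endswith value i)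

-- ===== PRECONDITION & SPEC =====
def Spec_check_file_type (result_filter : List String) (value : String) (out : Bool) : Prop := out = check_file_type_alt result_filter value
instance (result_filter : List String) (value : String) (out : Bool) : Decidable (Spec_check_file_type result_filter value out) := by unfold Spec_check_file_type; infer_instance

-- ===== CLAIM (what is proved, stated in full; the proofs are below) =====
def Claim_equal_check_file_type : Prop := ∀ (result_filter : List String) (value : String), Dom_check_file_type result_filter value → Spec_check_file_type result_filter value (check_file_type result_filter value)

-- ===== LEMMAS AND PROOFS =====

theorem pv_isEmpty_filter (l : List String) (p : String → Bool) :
    (l.filter p).isEmpty = !(l.any p) := by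
  induction l with
  | nil => rfl
  | cons a t ih => by_cases h : p a <;> simp [h, ih]

-- characterization of A's loop for arbitrary flag state
theorem check_file_type_loop_eq (value : String) (l : List String) (allowed found : Bool) :
    check_file_type_loop value l allowed found =
      if l.any (fun x => PySem.Str.startswith x "!" && PySem.Str.endswith value (pvNormExcl x)) then false
      else if found || l.any (fun x => !PySem.Str.startswith x "!") then
        allowed || l.any (fun x => !PySem.Str.startswith x "!" && PySem.Str.endswith value (pvNormIncl x))
      else true := by
  induction l generalizing allowed found with
  | nil => cases found <;> cases allowed <;> rfl
  | cons ext rest ih =>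
    by_cases hp : PySem.Str.startswith ext "!"
    · by_cases he : PySem.Str.endswith value (pvNormExcl ext)
      · simp only [check_file_type_loop, hp, he, if_true, List.any_cons, Bool.true_and,
          Bool.true_or]
      · rw [Bool.not_eq_true] at he
        simp only [check_file_type_loop, hp, he, if_true, List.any_cons,
          Bool.true_and, Bool.false_or, Bool.not_true, Bool.false_and, ih]
        simp
    · rw [Bool.not_eq_true] at hp
      simp only [check_file_type_loop, hp, List.any_cons, Bool.false_and,
        Bool.false_or, Bool.not_false, Bool.true_and, Bool.true_or, Bool.or_true, ih]
      simp only [Bool.false_eq_true, if_false]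
      cases hi : PySem.Str.endswith value (pvNormIncl ext) <;>
        simp only [if_true, Bool.false_eq_true, if_false] <;>
        generalize rest.any (fun x => PySem.Str.startswith x "!" && PySem.Str.endswith value (pvNormExcl x)) = aE <;>
        generalize rest.any (fun x => !PySem.Str.startswith x "!" && PySem.Str.endswith value (pvNormIncl x)) = aI <;>
        cases aE <;> cases aI <;> cases allowed <;> rfl

-- characterization of B's partition fold for arbitrary accumulator
theorem check_file_type_fold_eq (l : List String) (inc exc : List String) :
    l.foldl
      (fun (acc : List String × List String) ext =>
        if PySem.Str.startswith ext "!" then (acc.1, acc.2 ++ [pvNormExcl ext])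
        else (acc.1 ++ [pvNormIncl ext], acc.2))
      (inc, exc) =
      (inc ++ (l.filter (fun x => !PySem.Str.startswith x "!")).map pvNormIncl,
       exc ++ (l.filter (fun x => PySem.Str.startswith x "!")).map pvNormExcl) := by
  induction l generalizing inc exc with
  | nil => simp only [List.foldl_nil, List.filter_nil, List.map_nil, List.append_nil]
  | cons ext rest ih =>
    by_cases hp : PySem.Str.startswith ext "!"
    · simp only [List.foldl_cons, hp, if_true, ih, List.filter_cons, Bool.not_true,
        List.map_cons, List.cons_append, List.append_assoc, List.singleton_append]
      simp
    · rw [Bool.not_eq_true] at hp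
      simp only [List.foldl_cons, hp, ih, List.filter_cons, Bool.not_false,
        if_true, List.map_cons]
      simp

theorem check_file_type_eq (result_filter : List String) (value : String) :
    check_file_type result_filter value = check_file_type_alt result_filter value := by
  unfold check_file_type check_file_type_alt
  rw [check_file_type_loop_eq, check_file_type_fold_eq]
  simp only [List.nil_append, List.any_map, List.any_filter, Function.comp_def,
    Bool.false_or, List.isEmpty_map, pv_isEmpty_filter]
  generalize result_filter.any (fun x => PySem.Str.startswith x "!" && PySem.Str.endswith value (pvNormExcl x)) = aE
  generalize result_filter.any (fun x => !PySem.Str.startswith x "!") = aP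
  generalize result_filter.any (fun x => !PySem.Str.startswith x "!" && PySem.Str.endswith value (pvNormIncl x)) = aI
  cases aE <;> cases aP <;> cases aI <;> rfl

-- ===== VERDICT (by name: the statement is the Claim_ definition above) =====
theorem check_file_type_spec : Claim_equal_check_file_type := by
  intro result_filter value _
  unfold Spec_check_file_type
  exact check_file_type_eq result_filter value
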